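-- pv_equiv track=rewrite | github.com/maiomaijokovic-code/iran-war-monitor-2026 | build_daily_briefs_v2.py | build_source_angle
-- ===== SOURCE A (Python) =====
-- from collections import Counter, defaultdict
--
-- def build_source_angle(key_stories: list[dict]) -> str:
--     if not key_stories:
--         return "Le fonti del giorno non consentono ancora di distinguere un angolo di lettura prevalente."
--
--     source_map: dict[str, list[str]] = defaultdict(list)
--     for story in key_stories:
--         if story["source"] and story["title"]:
--             source_map[story["source"]].append(story["title"])
--
--     chunks = []
--     for source, titles in list(source_map.items())[:3]:
--         chunks.append(f"{source} insiste soprattutto su {titles[0].lower()}")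
--
--     if not chunks:
--         return "Le fonti convergono soprattutto sulla stessa sequenza di segnali politici e operativi."
--
--     return "Tra le fonti emerge una ripartizione abbastanza chiara: " + "; ".join(chunks) + "."
-- ===== SOURCE B (Python) =====
-- def build_source_angle(key_stories: list[dict]) -> str:
--     if not key_stories:
--         return "Le fonti del giorno non consentono ancora di distinguere un angolo di lettura prevalente."
--
--     # single pass: insertion-ordered dict source -> FIRST title, stop as soon as 3 sources found
--     first_by_source: dict[str, str] = {}
--     for story in key_stories:
--         if len(first_by_source) == 3:
--             break
--         if story["source"] and story["title"]:
--             if story["source"] not in first_by_source: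
--                 first_by_source[story["source"]] = story["title"]
--
--     chunks = [f"{source} insiste soprattutto su {title.lower()}"
--               for source, title in first_by_source.items()]
--
--     if not chunks:
--         return "Le fonti convergono soprattutto sulla stessa sequenza di segnali politici e operativi."
--
--     return "Tra le fonti emerge una ripartizione abbastanza chiara: " + "; ".join(chunks) + "."
-- ===== Notes on version B (the rewrite author's own statement) =====
-- stated objective: simpler
-- what changed: Instead of grouping every title into per-source lists and slicing the items afterwards, B keeps one insertion-ordered dict of each source's first title only and breaks out of the single pass as soon as 3 distinct sources are collected.
import Mathlib
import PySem

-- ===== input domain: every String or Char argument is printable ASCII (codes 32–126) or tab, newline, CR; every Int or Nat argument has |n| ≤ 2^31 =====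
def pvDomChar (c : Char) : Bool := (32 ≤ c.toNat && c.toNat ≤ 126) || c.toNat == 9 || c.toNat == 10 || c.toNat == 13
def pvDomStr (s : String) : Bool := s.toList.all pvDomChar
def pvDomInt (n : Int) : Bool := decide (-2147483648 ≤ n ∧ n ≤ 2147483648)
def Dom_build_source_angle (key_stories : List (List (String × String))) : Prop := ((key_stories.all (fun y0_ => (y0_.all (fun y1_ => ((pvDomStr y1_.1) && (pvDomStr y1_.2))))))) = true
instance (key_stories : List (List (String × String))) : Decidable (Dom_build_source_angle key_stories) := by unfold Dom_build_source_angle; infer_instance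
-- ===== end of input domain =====

-- B replaces A's per-source title lists + post-slice by one insertion-ordered dict of
-- first titles with an early break after 3 distinct sources (objective: simpler).


-- story["k"]: first-match lookup in the story dict; a missing key is a Python KeyError,
-- excluded by Pre_ below (inside Pre_ the getD "" default is never reached).
def storyGet (story : List (String × String)) (k : String) : String :=
  (PySem.Dict.mk story).getD k ""

-- ===== PORT A =====
-- body of A's grouping loop: defaultdict append, PySem.Dict.modify = d[k] = f(d.get(k, []))
def stepA (m : PySem.Dict String (List String)) (story : List (String × String)) :
    PySem.Dict String (List String) :=
  if storyGet story "source" ≠ "" ∧ storyGet story "title" ≠ "" then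
    m.modify (storyGet story "source") [] (· ++ [storyGet story "title"])
  else m

def build_source_angle (key_stories : List (List (String × String))) : String :=
  if key_stories = [] then
    "Le fonti del giorno non consentono ancora di distinguere un angolo di lettura prevalente."
  else
    let source_map := key_stories.foldl stepA PySem.Dict.empty
    -- titles[0]: the lists are only ever built nonempty, so headD "" is exact here
    let chunks := (source_map.items.take 3).map
      (fun p => p.1 ++ " insiste soprattutto su " ++ PySem.Str.lower (p.2.headD ""))
    if chunks = [] then
      "Le fonti convergono soprattutto sulla stessa sequenza di segnali politici e operativi."
    else
      "Tra le fonti emerge una ripartizione abbastanza chiara: " ++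
        PySem.Str.join "; " chunks ++ "."

-- ===== PORT B =====
-- Source B's single loop: break once the dict has 3 entries, else record a source's FIRST title
def bsaLoop : List (List (String × String)) → PySem.Dict String String →
    PySem.Dict String String
  | [], firsts => firsts
  | story :: rest, firsts =>
    if firsts.size = 3 then firsts
    else if storyGet story "source" ≠ "" ∧ storyGet story "title" ≠ "" then
      if firsts.contains (storyGet story "source") then bsaLoop rest firsts
      else bsaLoop rest (firsts.insert (storyGet story "source") (storyGet story "title"))
    else bsaLoop rest firsts

def build_source_angle_alt (key_stories : List (List (String × String))) : String :=
  if key_stories = [] then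
    "Le fonti del giorno non consentono ancora di distinguere un angolo di lettura prevalente."
  else
    let firsts := bsaLoop key_stories PySem.Dict.empty
    let chunks := firsts.items.map
      (fun q => q.1 ++ " insiste soprattutto su " ++ PySem.Str.lower q.2)
    if chunks = [] then
      "Le fonti convergono soprattutto sulla stessa sequenza di segnali politici e operativi."
    else
      "Tra le fonti emerge una ripartizione abbastanza chiara: " ++
        PySem.Str.join "; " chunks ++ "."

-- ===== PRECONDITION & SPEC =====
-- Pre_ excludes exactly the inputs where Python A raises KeyError: a story without a
-- "source" key, or with a truthy source but no "title" key.
def Pre_build_source_angle (key_stories : List (List (String × String))) : Prop :=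
  ∀ story ∈ key_stories,
    ((PySem.Dict.mk story).get? "source").isSome = true ∧
    ((PySem.Dict.mk story).getD "source" "" ≠ "" →
      ((PySem.Dict.mk story).get? "title").isSome = true)
instance (key_stories : List (List (String × String))) : Decidable (Pre_build_source_angle key_stories) := by unfold Pre_build_source_angle; infer_instance
def pvWitness_build_source_angle : (List (List (String × String))) :=
  [[("source", "Reuters"), ("title", "Strike On Base")]]
def Spec_build_source_angle (key_stories : List (List (String × String))) (out : String) : Prop := out = build_source_angle_alt key_stories
instance (key_stories : List (List (String × String))) (out : String) : Decidable (Spec_build_source_angle key_stories out) := by unfold Spec_build_source_angle; infer_instance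

-- ===== CLAIM (what is proved, stated in full; the proofs are below) =====
def Claim_equal_build_source_angle : Prop := ∀ (key_stories : List (List (String × String))), Dom_build_source_angle key_stories → Pre_build_source_angle key_stories → Spec_build_source_angle key_stories (build_source_angle key_stories)

-- ===== LEMMAS AND PROOFS =====

-- project A's (source, titles) entry to B's (source, first title) entry
def fstTitle (p : String × List String) : String × String := (p.1, p.2.headD "")

-- invariant carried over A's accumulator: unique keys and nonempty title lists
def GoodA (m : PySem.Dict String (List String)) : Prop :=
  m.keys.Nodup ∧ ∀ p ∈ m.items, p.2 ≠ []

theorem stepA_items_of_contains (m : PySem.Dict String (List String))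
    (story : List (String × String))
    (hg : storyGet story "source" ≠ "" ∧ storyGet story "title" ≠ "")
    (hc : m.contains (storyGet story "source") = true) :
    (stepA m story).items
      = m.items.map (fun p => if p.1 == storyGet story "source"
          then (storyGet story "source",
                m.getD (storyGet story "source") [] ++ [storyGet story "title"]) else p) := by
  simp [stepA, hg, PySem.Dict.modify, PySem.Dict.items_insert_of_contains _ _ hc]

theorem stepA_items_of_not_contains (m : PySem.Dict String (List String))
    (story : List (String × String))
    (hg : storyGet story "source" ≠ "" ∧ storyGet story "title" ≠ "")
    (hc : m.contains (storyGet story "source") = false) :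
    (stepA m story).items = m.items ++ [(storyGet story "source", [storyGet story "title"])] := by
  simp [stepA, hg, PySem.Dict.modify, PySem.Dict.items_insert_of_not_contains _ _ hc,
    PySem.Dict.getD_of_not_contains m [] hc]

theorem stepA_eq_insert (m : PySem.Dict String (List String)) (story : List (String × String))
    (hg : storyGet story "source" ≠ "" ∧ storyGet story "title" ≠ "") :
    stepA m story = m.insert (storyGet story "source")
      (m.getD (storyGet story "source") [] ++ [storyGet story "title"]) := by
  simp [stepA, hg, PySem.Dict.modify]

theorem goodA_stepA (m : PySem.Dict String (List String)) (story : List (String × String))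
    (h : GoodA m) : GoodA (stepA m story) := by
  obtain ⟨hnd, hv⟩ := h
  by_cases hg : storyGet story "source" ≠ "" ∧ storyGet story "title" ≠ ""
  · constructor
    · rw [stepA_eq_insert m story hg]
      exact PySem.Dict.nodup_keys_insert _ _ _ hnd
    · intro p hp
      by_cases hc : m.contains (storyGet story "source") = true
      · rw [stepA_items_of_contains m story hg hc, List.mem_map] at hp
        obtain ⟨q, hq, rfl⟩ := hp
        by_cases h : (q.1 == storyGet story "source") = true
        · simp only [h, if_pos]
          simp
        · simp only [h]
          simpa using hv q hq
      · rw [stepA_items_of_not_contains m story hg (by simpa using hc)] at hp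
        rcases List.mem_append.1 hp with h | h
        · exact hv p h
        · simp only [List.mem_singleton] at h
          rw [h]
          simp
  · have : stepA m story = m := by simp [stepA, hg]
    rw [this]; exact ⟨hnd, hv⟩

theorem map_fstTitle_stepA_of_contains (m : PySem.Dict String (List String))
    (story : List (String × String)) (h : GoodA m)
    (hg : storyGet story "source" ≠ "" ∧ storyGet story "title" ≠ "")
    (hc : m.contains (storyGet story "source") = true) :
    (stepA m story).items.map fstTitle = m.items.map fstTitle := by
  obtain ⟨hnd, hv⟩ := h
  rw [stepA_items_of_contains m story hg hc, List.map_map]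
  apply List.map_congr_left
  intro p hp
  by_cases h : p.1 = storyGet story "source"
  · have hget : m.getD (storyGet story "source") [] = p.2 := by
      rw [← h]; exact PySem.Dict.getD_of_mem_items m (by simpa using hp) hnd []
    have hne : p.2 ≠ [] := hv p hp
    obtain ⟨a, l, hal⟩ := List.exists_cons_of_ne_nil hne
    simp [fstTitle, Function.comp, h, hget, hal]
  · simp [fstTitle, Function.comp, h]

-- once A's dict already has ≥ 3 entries, the first three head-projected items never change
theorem stable (stories : List (List (String × String))) :
    ∀ m : PySem.Dict String (List String), GoodA m → 3 ≤ m.items.length →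
    ((stories.foldl stepA m).items.map fstTitle).take 3 = (m.items.map fstTitle).take 3 := by
  induction stories with
  | nil => intro m _ _; rfl
  | cons story rest ih =>
    intro m hG hlen
    rw [List.foldl_cons]
    have hG' := goodA_stepA m story hG
    by_cases hg : storyGet story "source" ≠ "" ∧ storyGet story "title" ≠ ""
    · by_cases hc : m.contains (storyGet story "source") = true
      · have hlen' : 3 ≤ (stepA m story).items.length := by
          rw [stepA_items_of_contains m story hg hc, List.length_map]; exact hlen
        rw [ih _ hG' hlen', map_fstTitle_stepA_of_contains m story hG hg hc]
      · have hitems := stepA_items_of_not_contains m story hg (by simpa using hc)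
        have hlen' : 3 ≤ (stepA m story).items.length := by
          rw [hitems, List.length_append]; omega
        rw [ih _ hG' hlen', hitems, List.map_append,
          List.take_append_of_le_length (by simpa using hlen)]
    · have : stepA m story = m := by simp [stepA, hg]
      rw [this]; exact ih m hG hlen

-- main loop correspondence: B's dict is always the first 3 head-projected items of A's dict
theorem loop_inv (stories : List (List (String × String))) :
    ∀ (m : PySem.Dict String (List String)) (mb : PySem.Dict String String),
    GoodA m → mb.items = (m.items.map fstTitle).take 3 →
    (bsaLoop stories mb).items = ((stories.foldl stepA m).items.map fstTitle).take 3 := by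
  induction stories with
  | nil => intro m mb _ h; simpa [bsaLoop] using h
  | cons story rest ih =>
    intro m mb hG hmb
    have hG' := goodA_stepA m story hG
    by_cases hsz : mb.size = 3
    · have hlen : 3 ≤ m.items.length := by
        have h1 := congrArg List.length hmb
        simp only [PySem.Dict.size] at hsz
        simp only [List.length_take, List.length_map, hsz] at h1
        omega
      rw [show bsaLoop (story :: rest) mb = mb from by simp [bsaLoop, hsz], List.foldl_cons]
      by_cases hg : storyGet story "source" ≠ "" ∧ storyGet story "title" ≠ ""
      · by_cases hc : m.contains (storyGet story "source") = true
        · have hlen' : 3 ≤ (stepA m story).items.length := by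
            rw [stepA_items_of_contains m story hg hc, List.length_map]; exact hlen
          rw [stable rest _ hG' hlen', map_fstTitle_stepA_of_contains m story hG hg hc, ← hmb]
        · have hitems := stepA_items_of_not_contains m story hg (by simpa using hc)
          have hlen' : 3 ≤ (stepA m story).items.length := by
            rw [hitems, List.length_append]; omega
          rw [stable rest _ hG' hlen', hitems, List.map_append,
            List.take_append_of_le_length (by simpa using hlen), ← hmb]
      · have hst : stepA m story = m := by simp [stepA, hg]
        rw [hst, stable rest m hG hlen, ← hmb]
    · -- fewer than 3 collected so far: B's dict is exactly the heads of A's whole dict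
      have hmlt : m.items.length < 3 := by
        have h1 := congrArg List.length hmb
        simp only [List.length_take, List.length_map] at h1
        have h2 : mb.items.length ≠ 3 := by simpa [PySem.Dict.size] using hsz
        omega
      have hfull : mb.items = m.items.map fstTitle := by
        rw [hmb, List.take_of_length_le (by rw [List.length_map]; omega)]
      rw [List.foldl_cons]
      by_cases hg : storyGet story "source" ≠ "" ∧ storyGet story "title" ≠ ""
      · have hkeys : mb.keys = m.keys := by
          show mb.items.map Prod.fst = m.items.map Prod.fst
          rw [hfull, List.map_map]; rfl
        have hcont : ∀ k, mb.contains k = m.contains k := by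
          intro k
          rw [PySem.Dict.contains_eq_decide_mem_keys, PySem.Dict.contains_eq_decide_mem_keys,
            hkeys]
        by_cases hc : m.contains (storyGet story "source") = true
        · have hstep : bsaLoop (story :: rest) mb = bsaLoop rest mb := by
            simp [bsaLoop, hsz, hg, hcont, hc]
          rw [hstep,
            ih _ mb hG' (by rw [map_fstTitle_stepA_of_contains m story hG hg hc, ← hmb])]
        · have hcb : mb.contains (storyGet story "source") = false := by
            rw [hcont]; simpa using hc
          have hstep : bsaLoop (story :: rest) mb
              = bsaLoop rest (mb.insert (storyGet story "source") (storyGet story "title")) := by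
            simp [bsaLoop, hsz, hg, hcb]
          have hitems := stepA_items_of_not_contains m story hg (by simpa using hc)
          have hmb' : (mb.insert (storyGet story "source") (storyGet story "title")).items
              = ((stepA m story).items.map fstTitle).take 3 := by
            rw [PySem.Dict.items_insert_of_not_contains _ _ hcb, hitems, List.map_append,
              hfull, List.take_of_length_le (by simp; omega)]
            rfl
          rw [hstep, ih _ _ hG' hmb']
      · have hst : stepA m story = m := by simp [stepA, hg]
        have hstep : bsaLoop (story :: rest) mb = bsaLoop rest mb := by
          simp [bsaLoop, hsz, hg]
        rw [hstep, hst]; exact ih m mb hG hmb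

-- ===== VERDICT (by name: the statement is the Claim_ definition above) =====
theorem build_source_angle_spec : Claim_equal_build_source_angle := by
  intro ks _ _
  show build_source_angle ks = build_source_angle_alt ks
  by_cases hnil : ks = []
  · simp [build_source_angle, build_source_angle_alt, hnil]
  · have hloop := loop_inv ks PySem.Dict.empty PySem.Dict.empty
      ⟨PySem.Dict.nodup_keys_empty, by intro p hp; simp [PySem.Dict.empty] at hp⟩ (by simp [PySem.Dict.empty])
    simp only [build_source_angle, build_source_angle_alt, hnil, if_false]
    rw [hloop, ← List.map_take]
    rw [List.map_map]
    rfl
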